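-- pv_equiv track=rewrite | github.com/kit-parco/networkit-hyperbolic-kd | cython/NetworKit.py | compressHistogram
-- ===== SOURCE A (Python) =====
-- import math
--
-- def compressHistogram(hist, nbins=20):
--     """ Compress a histogram to a number of bins"""
--     compressed = [None for i in range(nbins)]
--     labels = [None for i in range(nbins)]
--     nbinsprev = len(hist)
--     binwidth = math.ceil(nbinsprev / nbins)
--     for i in range(nbins):
--         l = i * binwidth
--         u = (i+1) * binwidth
--         compressed[i] = sum(hist[l : u])
--         labels[i] = "{0}-".format(l)
--     return (labels, compressed)
-- ===== SOURCE B (Python) =====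
-- def compressHistogram(hist, nbins=20):
--     """ Compress a histogram to a number of bins"""
--     binwidth = -(-len(hist) // nbins)
--     labels = ["{0}-".format(i * binwidth) for i in range(nbins)]
--     compressed = [0] * nbins
--     for idx, v in enumerate(hist):
--         compressed[idx // binwidth] += v
--     return (labels, compressed)
-- ===== Notes on version B (the rewrite author's own statement) =====
-- stated objective: alternative
-- what changed: replaces the per-bin loop that re-slices and sums hist[l:u] for every bin with a single pass over hist routing each element into compressed[idx // binwidth], bins pre-initialized to 0 and labels built by a separate comprehension
-- outside the precondition, e.g. on compressHistogram([1, 2], -2): A returns ([], []), B raises IndexError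
import Mathlib
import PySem

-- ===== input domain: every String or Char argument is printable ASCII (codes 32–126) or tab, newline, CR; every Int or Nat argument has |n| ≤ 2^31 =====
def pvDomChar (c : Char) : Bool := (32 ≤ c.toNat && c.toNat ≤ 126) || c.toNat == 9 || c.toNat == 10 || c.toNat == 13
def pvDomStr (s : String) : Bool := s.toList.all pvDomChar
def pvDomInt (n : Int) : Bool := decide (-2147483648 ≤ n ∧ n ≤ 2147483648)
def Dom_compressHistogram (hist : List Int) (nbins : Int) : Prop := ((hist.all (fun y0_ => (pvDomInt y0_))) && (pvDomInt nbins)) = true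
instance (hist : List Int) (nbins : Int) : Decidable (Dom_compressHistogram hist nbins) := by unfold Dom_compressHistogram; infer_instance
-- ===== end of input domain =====

-- B replaces A's per-bin loop (sum of a fresh slice hist[l:u] for every bin) by a single pass over
-- hist routing each element into its bin; same cost class, alternative decomposition (not claimed faster).

-- ===== PORT A =====
-- math.ceil(nbinsprev / nbins) is ported as the integer ceiling division -((-nbinsprev) // nbins);
-- exact here: on Dom all magnitudes are ≤ 2^31 < 2^53, where float division cannot cross an integer.
def compressHistogram (hist : List Int) (nbins : Int) : List String × List Int :=
  let nbinsprev : Int := PySem.List.len hist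
  let binwidth : Int := -(PySem.Int.floordiv (-nbinsprev) nbins)
  (PySem.List.pyRange 0 nbins 1).foldl
    (fun acc i =>
      let l := i * binwidth
      let u := (i + 1) * binwidth
      (acc.1 ++ [PySem.Int.toStr l ++ "-"],
       acc.2 ++ [(PySem.List.slice hist (some l) (some u)).sum]))
    ([], [])

-- ===== PORT B =====
-- port of Source B: labels by a comprehension over range(nbins); compressed = [0]*nbins (empty when
-- nbins ≤ 0, hence List.replicate nbins.toNat), then one pass 'compressed[idx // binwidth] += v';
-- pySetD/pyGetD are the total forms of the Python item assignment/read, in range under Pre_.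
def compressHistogram_alt (hist : List Int) (nbins : Int) : List String × List Int :=
  let binwidth : Int := -(PySem.Int.floordiv (-(PySem.List.len hist)) nbins)
  let labels := (PySem.List.pyRange 0 nbins 1).map (fun i => PySem.Int.toStr (i * binwidth) ++ "-")
  let compressed := (PySem.List.enumerate hist 0).foldl
    (fun acc p =>
      PySem.List.pySetD acc (PySem.Int.floordiv p.1 binwidth)
        (PySem.List.pyGetD acc (PySem.Int.floordiv p.1 binwidth) 0 + p.2))
    (List.replicate nbins.toNat 0)
  (labels, compressed)

-- ===== PRECONDITION & SPEC =====
-- Pre_ excludes nbins = 0, where A (and B) raise ZeroDivisionError, and nbins < 0 with nonempty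
-- hist, where A returns ([], []) from an empty range loop while B's element pass raises IndexError.
def Pre_compressHistogram (hist : List Int) (nbins : Int) : Prop :=
  nbins ≠ 0 ∧ (0 < nbins ∨ hist = [])
instance (hist : List Int) (nbins : Int) : Decidable (Pre_compressHistogram hist nbins) := by unfold Pre_compressHistogram; infer_instance
def pvWitness_compressHistogram : List Int × Int := ([1, 2, 3], 2)

def Spec_compressHistogram (hist : List Int) (nbins : Int) (out : List String × List Int) : Prop := out = compressHistogram_alt hist nbins
instance (hist : List Int) (nbins : Int) (out : List String × List Int) : Decidable (Spec_compressHistogram hist nbins out) := by unfold Spec_compressHistogram; infer_instance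

-- ===== CLAIM (what is proved, stated in full; the proofs are below) =====
def Claim_equal_compressHistogram : Prop := ∀ (hist : List Int) (nbins : Int), Dom_compressHistogram hist nbins → Pre_compressHistogram hist nbins → Spec_compressHistogram hist nbins (compressHistogram hist nbins)

-- ===== LEMMAS AND PROOFS =====

-- B's scatter pass, rephrased over Nat indices (s = current index, B = bin width).
def pvScatter (B : Nat) : List Int → Nat → List Int → List Int
  | [], _, acc => acc
  | v :: t, s, acc => pvScatter B t (s + 1) (acc.set (s / B) (acc.getD (s / B) 0 + v))

-- Sum of the elements of xs (whose first element has index s) that fall into bin j.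
def pvSumIn (B : Nat) : List Int → Nat → Nat → Int
  | [], _, _ => 0
  | v :: t, s, j => (if s / B = j then v else 0) + pvSumIn B t (s + 1) j

theorem pv_div_eq_iff (s B j : Nat) (hB : 0 < B) :
    s / B = j ↔ j * B ≤ s ∧ s < (j + 1) * B := by
  constructor
  · rintro rfl
    refine ⟨Nat.div_mul_le_self s B, ?_⟩
    rw [add_mul, one_mul]
    exact (Nat.lt_div_mul_add hB).trans_eq (by ring)
  · rintro ⟨h1, h2⟩
    exact Nat.div_eq_of_lt_le h1 h2

theorem pv_getD_set (l : List Int) (i j : Nat) (a d : Int) :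
    (l.set i a).getD j d = if i = j ∧ i < l.length then a else l.getD j d := by
  simp only [List.getD_eq_getElem?_getD, List.getElem?_set]
  split_ifs with h1 h2 h3 <;> simp_all
  omega

theorem pv_fold_enum (B : Nat) (xs : List Int) : ∀ (s : Nat) (acc : List Int),
    (PySem.List.enumerate xs (s : Int)).foldl
      (fun acc p =>
        PySem.List.pySetD acc (PySem.Int.floordiv p.1 (B : Int))
          (PySem.List.pyGetD acc (PySem.Int.floordiv p.1 (B : Int)) 0 + p.2)) acc
    = pvScatter B xs s acc := by
  induction xs with
  | nil => intro s acc; simp [pvScatter, PySem.List.enumerate_nil]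
  | cons v t ih =>
    intro s acc
    rw [PySem.List.enumerate_cons]
    have hs1 : (s : Int) + 1 = ((s + 1 : Nat) : Int) := by push_cast; ring
    simp only [List.foldl_cons, PySem.Int.floordiv_natCast, PySem.List.pySetD_natCast,
      PySem.List.pyGetD_natCast, hs1, ih, pvScatter]

theorem pv_scatter_length (B : Nat) (xs : List Int) : ∀ (s : Nat) (acc : List Int),
    (pvScatter B xs s acc).length = acc.length := by
  induction xs with
  | nil => intro s acc; simp [pvScatter]
  | cons v t ih => intro s acc; simp [pvScatter, ih]

theorem pv_scatter_getD (B : Nat) (xs : List Int) : ∀ (s : Nat) (acc : List Int) (j : Nat),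
    j < acc.length →
    (pvScatter B xs s acc).getD j 0 = acc.getD j 0 + pvSumIn B xs s j := by
  induction xs with
  | nil => intro s acc j _; simp [pvScatter, pvSumIn]
  | cons v t ih =>
    intro s acc j hj
    rw [pvScatter, pvSumIn, ih (s + 1) _ j (by simpa using hj), pv_getD_set]
    by_cases hq : s / B = j
    · rw [if_pos ⟨hq, hq ▸ hj⟩, if_pos hq, hq]
      ring
    · rw [if_neg (by tauto), if_neg hq]
      ring

theorem pv_sumIn_eq (B : Nat) (hB : 0 < B) (xs : List Int) : ∀ (s j : Nat),
    pvSumIn B xs s j = ((xs.drop (j * B - s)).take ((j + 1) * B - max s (j * B))).sum := by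
  induction xs with
  | nil => intro s j; simp [pvSumIn]
  | cons v t ih =>
    intro s j
    rw [pvSumIn, ih (s + 1) j]
    rcases Nat.lt_or_ge s (j * B) with hs | hs
    · -- current element is before bin j
      rw [if_neg (by rw [pv_div_eq_iff s B j hB]; omega)]
      have hd : j * B - s = (j * B - (s + 1)) + 1 := by omega
      rw [hd, List.drop_succ_cons]
      have : max s (j * B) = j * B := by omega
      have h2 : max (s + 1) (j * B) = j * B := by omega
      rw [this, h2]
      ring
    · rcases Nat.lt_or_ge s ((j + 1) * B) with hs2 | hs2
      · -- current element lands in bin j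
        rw [if_pos (by rw [pv_div_eq_iff s B j hB]; constructor <;> omega)]
        have hd : j * B - s = 0 := by omega
        have hd2 : j * B - (s + 1) = 0 := by omega
        have hm : max s (j * B) = s := by omega
        have hm2 : max (s + 1) (j * B) = s + 1 := by omega
        have ht : (j + 1) * B - s = ((j + 1) * B - (s + 1)) + 1 := by omega
        rw [hd, hd2, hm, hm2, ht, List.drop_zero, List.drop_zero, List.take_succ_cons,
          List.sum_cons]
      · -- current element is past bin j; both sides take 0 elements
        rw [if_neg (by rw [pv_div_eq_iff s B j hB]; omega)]
        have hm2 : (j + 1) * B - max (s + 1) (j * B) = 0 := by omega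
        have hm : (j + 1) * B - max s (j * B) = 0 := by omega
        rw [hm, hm2]
        simp

-- ===== VERDICT (by name: the statement is the Claim_ definition above) =====
theorem compressHistogram_spec : Claim_equal_compressHistogram := by
  intro hist nbins _ hpre
  obtain ⟨hnz, hcase⟩ := hpre
  unfold Spec_compressHistogram compressHistogram compressHistogram_alt
  simp only [PySem.List.len_eq]
  set b : Int := -(PySem.Int.floordiv (-(hist.length : Int)) nbins) with hb
  have hpair := PySem.List.foldl_prod_mk
    (fun (a : List String) (i : Int) => a ++ [PySem.Int.toStr (i * b) ++ "-"])
    (fun (c : List Int) (i : Int) =>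
      c ++ [(PySem.List.slice hist (some (i * b)) (some ((i + 1) * b))).sum])
    (PySem.List.pyRange 0 nbins 1) [] []
  simp only [] at hpair
  rw [hpair, PySem.List.foldl_append_singleton_eq_map, PySem.List.foldl_append_singleton_eq_map]
  simp only [List.nil_append]
  refine Prod.ext rfl ?_
  by_cases hhe : hist = []
  · -- empty histogram: every A-bin sums an empty slice to 0; B's pass touches nothing
    subst hhe
    simp only [PySem.List.enumerate_nil, List.foldl_nil]
    rw [List.eq_replicate_iff]
    constructor
    · simp [PySem.List.length_pyRange_one]
    · intro x hx
      rw [List.mem_map] at hx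
      obtain ⟨i, _, rfl⟩ := hx
      simp [PySem.List.slice]
  · -- nonempty histogram, 0 < nbins: scatter = per-bin slice sums
    have hpos : 0 < nbins := by
      rcases hcase with h | h
      · exact h
      · exact absurd h hhe
    have hn1 : 0 < hist.length := List.length_pos_iff.mpr hhe
    have hchar : (b - 1) * nbins < (hist.length : Int) ∧ (hist.length : Int) ≤ b * nbins :=
      (PySem.Int.neg_floordiv_neg_eq_iff_of_pos hpos).mp hb.symm
    have hbpos : 0 < b := by nlinarith [hchar.1, hchar.2]
    obtain ⟨B, hB⟩ : ∃ B : Nat, b = (B : Int) := ⟨b.toNat, (Int.toNat_of_nonneg hbpos.le).symm⟩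
    obtain ⟨N, hN⟩ : ∃ N : Nat, nbins = (N : Int) := ⟨nbins.toNat, (Int.toNat_of_nonneg hpos.le).symm⟩
    have hBpos : 0 < B := by omega
    dsimp only
    rw [hB, hN]
    have htoNat : ((N : Int)).toNat = N := by simp
    rw [htoNat]
    have hfe := pv_fold_enum B hist 0 (List.replicate N 0)
    simp only [Nat.cast_zero] at hfe
    rw [hfe, PySem.List.pyRange_zero_natCast, List.map_map]
    apply List.ext_getElem
    · simp [pv_scatter_length]
    · intro j h1 h2
      have hjN : j < N := by simpa using h1
      have hlen : j < (List.replicate N (0 : Int)).length := by simpa using hjN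
      rw [← List.getD_eq_getElem _ 0 h2, pv_scatter_getD B hist 0 _ j hlen,
        pv_sumIn_eq B hBpos hist 0 j]
      simp only [List.getElem_map, List.getElem_range, Function.comp_apply]
      have hc1 : ((j : Int)) * (B : Int) = ((j * B : Nat) : Int) := by push_cast; ring
      have hc2 : ((j : Int) + 1) * (B : Int) = ((j * B : Nat) : Int) + (B : Nat) := by
        push_cast; ring
      rw [hc1, hc2, PySem.List.slice_natCast_add]
      have hd : j * B - 0 = j * B := by omega
      have ht : (j + 1) * B - max 0 (j * B) = B := by
        have : max 0 (j * B) = j * B := by omega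
        rw [this]; ring_nf; omega
      rw [hd, ht]
      simp
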